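-- pv_equiv track=rewrite | github.com/m1nnh/Tech-Interview-QnA | Algorithm/Level2/[3차] 파일명 정렬.py | div_file
-- ===== SOURCE A (Python) =====
-- def div_file(files, i):
--     flag = True
--     head, number = "", ""
--
--     for j in range(len(files[i])):
--
--         if files[i][j].isdigit():
--             number += files[i][j]
--             flag = False
--         elif flag is False:
--             break
--         else:
--             head += files[i][j]
--
--     return head.lower(), int(number)
-- ===== SOURCE B (Python) =====
-- def div_file(files, i):
--     # Two index scans + slicing instead of A's char-accumulation loop with a flag state machine.
--     s = files[i]
--     n = len(s)
--     p = 0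
--     while p < n and not s[p].isdigit():
--         p += 1
--     q = p
--     while q < n and s[q].isdigit():
--         q += 1
--     return s[:p].lower(), int(s[p:q])
-- ===== Notes on version B (the rewrite author's own statement) =====
-- stated objective: idiomatic
-- what changed: Replaces A's per-character accumulation loop with a flag state machine by two index scans (first digit, end of the digit run) followed by slicing out head and number.
import Mathlib
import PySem

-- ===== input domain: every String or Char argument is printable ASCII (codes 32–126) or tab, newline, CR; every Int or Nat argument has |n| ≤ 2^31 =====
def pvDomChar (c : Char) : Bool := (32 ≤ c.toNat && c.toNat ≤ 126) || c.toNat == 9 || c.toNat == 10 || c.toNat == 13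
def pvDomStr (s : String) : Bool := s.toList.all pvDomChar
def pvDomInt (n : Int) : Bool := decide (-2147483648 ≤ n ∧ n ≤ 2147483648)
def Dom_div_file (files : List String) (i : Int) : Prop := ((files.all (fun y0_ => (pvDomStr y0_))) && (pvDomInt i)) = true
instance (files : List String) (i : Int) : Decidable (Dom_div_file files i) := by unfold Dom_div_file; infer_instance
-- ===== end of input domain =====

-- B replaces A's per-character accumulation loop (flag state machine) by two index
-- scans and slicing; same cost, plainer decomposition.

-- ===== PORT A =====
-- the for-loop over the characters of files[i]: state (flag, head, number); 'break' = return
def divFileLoopA : List Char → Bool → List Char → List Char → List Char × List Char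
  | [], _, head, number => (head, number)
  | c :: rest, flag, head, number =>
    if PySem.Chars.isdigit c then divFileLoopA rest false head (number ++ [c])
    else if flag = false then (head, number)
    else divFileLoopA rest flag (head ++ [c]) number

def div_file (files : List String) (i : Int) : String × Int :=
  let s := (PySem.List.pyGet? files i).getD ""   -- files[i]; none (IndexError) excluded by Pre_
  let r := divFileLoopA s.toList true [] []
  (String.mk (PySem.Chars.lower r.1), (PySem.Int.ofChars? r.2).getD 0)  -- int('') (ValueError) excluded by Pre_

-- ===== PORT B =====
-- one while-loop 'advance while pred holds' of Source B, counting the steps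
def scanCount (p : Char → Bool) : List Char → Nat
  | [] => 0
  | c :: rest => if p c then scanCount p rest + 1 else 0

def div_file_alt (files : List String) (i : Int) : String × Int :=
  let s := (PySem.List.pyGet? files i).getD ""   -- files[i]; none (IndexError) excluded by Pre_
  let cs := s.toList
  let p := scanCount (fun c => !PySem.Chars.isdigit c) cs
  let rest := cs.drop p
  let q := scanCount (fun c => PySem.Chars.isdigit c) rest
  (String.mk (PySem.Chars.lower (cs.take p)), (PySem.Int.ofChars? (rest.take q)).getD 0)  -- int('') excluded by Pre_

-- ===== PRECONDITION & SPEC =====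
-- Pre_: i a valid index and files[i] contains a digit; otherwise A raises (IndexError / ValueError from int('')).
def Pre_div_file (files : List String) (i : Int) : Prop :=
  PySem.Raise.InRange files.length i ∧
    (((PySem.List.pyGet? files i).getD "").toList.any (fun c => PySem.Chars.isdigit c)) = true
instance (files : List String) (i : Int) : Decidable (Pre_div_file files i) := by
  unfold Pre_div_file; infer_instance

def pvWitness_div_file : List String × Int := (["a1"], 0)

def Spec_div_file (files : List String) (i : Int) (out : String × Int) : Prop := out = div_file_alt files i
instance (files : List String) (i : Int) (out : String × Int) : Decidable (Spec_div_file files i out) := by unfold Spec_div_file; infer_instance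

-- ===== CLAIM (what is proved, stated in full; the proofs are below) =====
def Claim_equal_div_file : Prop := ∀ (files : List String) (i : Int), Dom_div_file files i → Pre_div_file files i → Spec_div_file files i (div_file files i)

-- ===== LEMMAS AND PROOFS =====

-- once flag is False, the loop only swallows further digits, then stops
theorem divFileLoopA_false (rest head number) :
    divFileLoopA rest false head number
      = (head, number ++ rest.takeWhile (fun c => PySem.Chars.isdigit c)) := by
  induction rest generalizing number with
  | nil => simp [divFileLoopA]
  | cons c r ih =>
    by_cases h : PySem.Chars.isdigit c = true <;>
      simp [divFileLoopA, List.takeWhile_cons, h, ih]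

-- with flag True and empty number, the loop is: head = non-digit prefix, number = digit run after it
theorem divFileLoopA_true (rest head) :
    divFileLoopA rest true head []
      = (head ++ rest.takeWhile (fun c => !PySem.Chars.isdigit c),
         (rest.dropWhile (fun c => !PySem.Chars.isdigit c)).takeWhile
           (fun c => PySem.Chars.isdigit c)) := by
  induction rest generalizing head with
  | nil => simp [divFileLoopA]
  | cons c r ih =>
    by_cases h : PySem.Chars.isdigit c = true
    · simp [divFileLoopA, List.takeWhile_cons, List.dropWhile_cons, h, divFileLoopA_false]
    · simp [divFileLoopA, List.takeWhile_cons, List.dropWhile_cons, h, ih]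

theorem take_scanCount (p : Char → Bool) (l : List Char) :
    l.take (scanCount p l) = l.takeWhile p := by
  induction l with
  | nil => rfl
  | cons c r ih =>
    by_cases h : p c = true <;> simp [scanCount, List.takeWhile_cons, h, ih]

theorem drop_scanCount (p : Char → Bool) (l : List Char) :
    l.drop (scanCount p l) = l.dropWhile p := by
  induction l with
  | nil => rfl
  | cons c r ih =>
    by_cases h : p c = true <;> simp [scanCount, List.dropWhile_cons, h, ih]

-- ===== VERDICT (by name: the statement is the Claim_ definition above) =====
theorem div_file_spec : Claim_equal_div_file := by
  intro files i _ _
  show div_file files i = div_file_alt files i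
  unfold div_file div_file_alt
  simp only [divFileLoopA_true, take_scanCount, drop_scanCount, List.nil_append]
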